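-- pv_equiv track=rewrite | github.com/woxQAQ/leetcode-lab | python/2333.minimum-sum-of-squared-difference/solution.py | minSumSquareDiff
-- ===== SOURCE A (Python) =====
-- from typing import List
--
-- def minSumSquareDiff(
--     nums1: List[int], nums2: List[int], k1: int, k2: int
-- ) -> int:
--     # [1,8,15,17]
--     #
--     # 可以证明，对于d1>d2
--     # d1^2 - (d1-1)^2= 2d1-1 > 2d2_1
--     # 即对大的数字进行 '-' 操作所能减少的平方和最大
--     # 因此我们优先对 diff 值较大的下标进行操作
--     #
--     # 由于我们对数字可以加或者减，
--     # 对 d1 进行加等价于对 d2 进行减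
--     # 因此我们只需要对 diff 进行操作即可
--
--     # diff = sorted([abs(a - b) for a, b in zip(nums1, nums2)], reverse=True)
--     diff = [abs(a - b) for a, b in zip(nums1, nums2)]
--     ans = sum(d * d for d in diff)
--
--     ops = k1 + k2
--
--     if sum(diff) < ops:
--         return 0
--
--     diff.sort(reverse=True)
--     diff += [0]
--     for i, v in enumerate(diff):
--         ans -= v * v
--         j = i + 1
--         c = j * (v - diff[j])
--         if c < ops:
--             ops -= c
--             continue
--         v -= ops // j
--         return ans + (v - 1) * (v - 1) * (ops % j) + (j - ops % j) * v * v
-- ===== SOURCE B (Python) =====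
-- def minSumSquareDiff(nums1, nums2, k1, k2):
--     cnt = {}
--     for a, b in zip(nums1, nums2):
--         d = abs(a - b)
--         cnt[d] = cnt.get(d, 0) + 1
--     ops = k1 + k2
--     total = sum(v * c for v, c in cnt.items())
--     if total <= ops:
--         return 0
--     ans = sum(v * v * c for v, c in cnt.items())
--     levels = sorted(cnt, reverse=True)
--     levels.append(0)
--     above = 0
--     for v, nxt in zip(levels, levels[1:]):
--         m = cnt[v]
--         above += m
--         ans -= m * v * v
--         need = above * (v - nxt)
--         if need < ops:
--             ops -= need
--         else:
--             q, r = divmod(ops, above)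
--             w = v - q
--             return ans + r * (w - 1) * (w - 1) + (above - r) * w * w
--     return ans
-- ===== Notes on version B (the rewrite author's own statement) =====
-- stated objective: alternative
-- what changed: B replaces A's per-element walk over the sorted diff list (with index arithmetic into the list) by a bucket-count walk: it builds a dict of counts of the absolute differences and iterates over the distinct diff values sorted descending, levelling a whole band of 'above' elements down to the next distinct value in one step, distributing the remainder when the operation budget runs out inside a level.
-- outside the precondition, e.g. on minSumSquareDiff([0, 0], [0, 0], -3, 0): A returns 9, B returns 5
import Mathlib
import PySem

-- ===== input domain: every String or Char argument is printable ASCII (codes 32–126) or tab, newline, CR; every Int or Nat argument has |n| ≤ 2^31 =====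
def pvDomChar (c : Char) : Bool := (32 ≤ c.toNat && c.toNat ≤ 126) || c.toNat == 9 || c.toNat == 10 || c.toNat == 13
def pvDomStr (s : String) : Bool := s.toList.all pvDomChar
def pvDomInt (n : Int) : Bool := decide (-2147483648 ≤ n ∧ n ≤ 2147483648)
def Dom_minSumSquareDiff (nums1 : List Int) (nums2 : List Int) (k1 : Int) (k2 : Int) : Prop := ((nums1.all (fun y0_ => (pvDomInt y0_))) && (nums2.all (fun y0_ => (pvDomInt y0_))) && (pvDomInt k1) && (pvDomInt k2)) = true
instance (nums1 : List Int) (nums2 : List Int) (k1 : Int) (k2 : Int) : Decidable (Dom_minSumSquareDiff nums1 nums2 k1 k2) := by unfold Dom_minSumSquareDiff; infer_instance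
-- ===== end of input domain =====

-- B replaces A's per-element walk over the sorted diff list by a walk over the distinct diff
-- values (bucket counts from a dict), levelling one whole band per step (objective: alternative).

-- ===== PORT A =====
-- A's for-loop: state (remaining suffix, i, ops, ans); 'full' is the whole list diff + [0];
-- diff[j] is PySem.List.pyGet? full j (none = IndexError, unreachable under Pre_)
def pvLoopA (full : List Int) : List Int → Int → Int → Int → Option Int
  | [], _, _, _ => none
  | v :: rest, i, ops, ans =>
    let ans1 := ans - v * v
    let j := i + 1
    match PySem.List.pyGet? full j with
    | none => none
    | some nxt =>
      let c := j * (v - nxt)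
      if c < ops then pvLoopA full rest (i + 1) (ops - c) ans1
      else
        let v1 := v - PySem.Int.floordiv ops j
        some (ans1 + (v1 - 1) * (v1 - 1) * PySem.Int.mod ops j + (j - PySem.Int.mod ops j) * v1 * v1)

def minSumSquareDiff (nums1 : List Int) (nums2 : List Int) (k1 : Int) (k2 : Int) : Int :=
  let diff := (nums1.zip nums2).map (fun p => |p.1 - p.2|)
  let ans := diff.foldl (fun s d => s + d * d) 0
  let ops := k1 + k2
  if diff.foldl (fun s d => s + d) 0 < ops then 0
  else
    let diff2 := PySem.List.sorted diff (fun x => x) true ++ [0]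
    match pvLoopA diff2 diff2 0 ops ans with
    | some r => r
    | none => 0

-- ===== PORT B =====
-- B's for-loop over zip(levels, levels[1:]): state (remaining levels, above, ops, ans)
def pvLoopB (cnt : PySem.Dict Int Int) : List Int → Int → Int → Int → Int
  | v :: nxt :: rest, above, ops, ans =>
    let m := cnt.getD v 0
    let above1 := above + m
    let ans1 := ans - m * v * v
    let need := above1 * (v - nxt)
    if need < ops then pvLoopB cnt (nxt :: rest) above1 (ops - need) ans1
    else
      let q := PySem.Int.floordiv ops above1
      let r := PySem.Int.mod ops above1
      let w := v - q
      ans1 + r * (w - 1) * (w - 1) + (above1 - r) * w * w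
  | _, _, _, ans => ans

def minSumSquareDiff_alt (nums1 : List Int) (nums2 : List Int) (k1 : Int) (k2 : Int) : Int :=
  let cnt := (nums1.zip nums2).foldl
    (fun d p => d.insert |p.1 - p.2| (d.getD |p.1 - p.2| 0 + 1)) PySem.Dict.empty
  let ops := k1 + k2
  let total := cnt.items.foldl (fun s p => s + p.1 * p.2) 0
  if total ≤ ops then 0
  else
    let ans := cnt.items.foldl (fun s p => s + p.1 * p.1 * p.2) 0
    let levels := PySem.List.sorted cnt.keys (fun x => x) true ++ [0]
    pvLoopB cnt levels 0 ops ans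

-- ===== PRECONDITION & SPEC =====
-- Pre_ excludes (a) a negative total operation budget k1 + k2 — operation counts outside the
-- problem's natural domain, where A's floor-division greedy returns accidental values — and
-- (b) empty input with k1 + k2 = 0, where A raises IndexError (B returns 0 there).
def Pre_minSumSquareDiff (nums1 : List Int) (nums2 : List Int) (k1 : Int) (k2 : Int) : Prop :=
  0 ≤ k1 + k2 ∧ ((nums1 = [] ∨ nums2 = []) → 0 < k1 + k2)
instance (nums1 : List Int) (nums2 : List Int) (k1 : Int) (k2 : Int) : Decidable (Pre_minSumSquareDiff nums1 nums2 k1 k2) := by unfold Pre_minSumSquareDiff; infer_instance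

def pvWitness_minSumSquareDiff : List Int × List Int × Int × Int := ([1, 8, 15], [3, 2, 9], 2, 3)

def Spec_minSumSquareDiff (nums1 : List Int) (nums2 : List Int) (k1 : Int) (k2 : Int) (out : Int) : Prop := out = minSumSquareDiff_alt nums1 nums2 k1 k2
instance (nums1 : List Int) (nums2 : List Int) (k1 : Int) (k2 : Int) (out : Int) : Decidable (Spec_minSumSquareDiff nums1 nums2 k1 k2 out) := by unfold Spec_minSumSquareDiff; infer_instance

-- ===== CLAIM (what is proved, stated in full; the proofs are below) =====
def Claim_equal_minSumSquareDiff : Prop := ∀ (nums1 : List Int) (nums2 : List Int) (k1 : Int) (k2 : Int), Dom_minSumSquareDiff nums1 nums2 k1 k2 → Pre_minSumSquareDiff nums1 nums2 k1 k2 → Spec_minSumSquareDiff nums1 nums2 k1 k2 (minSumSquareDiff nums1 nums2 k1 k2)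

-- ===== LEMMAS AND PROOFS =====

theorem pvLoopA_step (full : List Int) (v : Int) (rest : List Int) (i ops ans : Int) :
    pvLoopA full (v :: rest) i ops ans =
      (match PySem.List.pyGet? full (i + 1) with
       | none => none
       | some nxt =>
         if (i + 1) * (v - nxt) < ops then
           pvLoopA full rest (i + 1) (ops - (i + 1) * (v - nxt)) (ans - v * v)
         else
           some ((ans - v * v) + (v - PySem.Int.floordiv ops (i + 1) - 1) * (v - PySem.Int.floordiv ops (i + 1) - 1) * PySem.Int.mod ops (i + 1) + (i + 1 - PySem.Int.mod ops (i + 1)) * (v - PySem.Int.floordiv ops (i + 1)) * (v - PySem.Int.floordiv ops (i + 1)))) := rfl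

def pvLoopS : List Int → Int → Int → Int → Option Int
  | [], _, _, _ => none
  | [_], _, _, _ => none
  | v :: nxt :: rest, j, ops, ans =>
    let ans1 := ans - v * v
    let c := j * (v - nxt)
    if c < ops then pvLoopS (nxt :: rest) (j + 1) (ops - c) ans1
    else
      let v1 := v - PySem.Int.floordiv ops j
      some (ans1 + (v1 - 1) * (v1 - 1) * PySem.Int.mod ops j + (j - PySem.Int.mod ops j) * v1 * v1)

theorem pvLoopS_step (v nxt : Int) (rest : List Int) (j ops ans : Int) :
    pvLoopS (v :: nxt :: rest) j ops ans =
      (if j * (v - nxt) < ops then pvLoopS (nxt :: rest) (j + 1) (ops - j * (v - nxt)) (ans - v * v)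
       else
         some ((ans - v * v) + (v - PySem.Int.floordiv ops j - 1) * (v - PySem.Int.floordiv ops j - 1) * PySem.Int.mod ops j + (j - PySem.Int.mod ops j) * (v - PySem.Int.floordiv ops j) * (v - PySem.Int.floordiv ops j))) := rfl

theorem pvLoopA_eq_pvLoopS (l : List Int) : ∀ (pre : List Int) (ops ans : Int),
    pvLoopA (pre ++ l) l (pre.length : Int) ops ans = pvLoopS l ((pre.length : Int) + 1) ops ans := by
  induction l with
  | nil => intro pre ops ans; simp [pvLoopA, pvLoopS]
  | cons v l ih =>
    intro pre ops ans
    rw [pvLoopA_step]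
    match l with
    | [] =>
      have hget : PySem.List.pyGet? (pre ++ [v]) ((pre.length : Int) + 1) = none := by
        have h1 : ((pre.length : Int) + 1) = ((pre ++ [v]).length : Int) := by simp
        rw [h1, PySem.List.pyGet?_natCast]
        simp
      rw [hget]
      rfl
    | nxt :: rest =>
      have h1 : (pre.length : Int) + 1 = (((pre ++ [v]).length : Nat) : Int) := by simp
      have h2 : pre ++ v :: nxt :: rest = (pre ++ [v]) ++ nxt :: rest := by simp
      have hget : PySem.List.pyGet? (pre ++ v :: nxt :: rest) ((pre.length : Int) + 1) = some nxt := by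
        rw [h1, h2, PySem.List.pyGet?_natCast]
        simp
      rw [hget, pvLoopS_step]
      dsimp only
      split_ifs with h
      · rw [h2, h1, ih (pre ++ [v])]
      · rfl

def pvBoundary (tail : List Int) (v nxt J ops ans1 : Int) : Option Int :=
  if J * (v - nxt) < ops then pvLoopS (nxt :: tail) (J + 1) (ops - J * (v - nxt)) ans1
  else
    some (ans1 + (v - PySem.Int.floordiv ops J - 1) * (v - PySem.Int.floordiv ops J - 1) * PySem.Int.mod ops J + (J - PySem.Int.mod ops J) * (v - PySem.Int.floordiv ops J) * (v - PySem.Int.floordiv ops J))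

theorem pvLoopS_cons (v nxt : Int) (rest : List Int) (j ops ans : Int) :
    pvLoopS (v :: nxt :: rest) j ops ans = pvBoundary rest v nxt j ops (ans - v * v) := rfl

theorem pvLoopS_run (v nxt : Int) (tail : List Int) : ∀ (m : Nat) (j ops ans : Int), 1 ≤ m → 0 < ops →
    pvLoopS (List.replicate m v ++ nxt :: tail) j ops ans =
      pvBoundary tail v nxt (j + (m : Int) - 1) ops (ans - (m : Int) * v * v) := by
  intro m
  induction m with
  | zero => omega
  | succ k ih =>
    intro j ops ans _ hops
    match k, ih with
    | 0, _ =>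
      have h0 : List.replicate (0 + 1) v ++ nxt :: tail = v :: nxt :: tail := rfl
      rw [h0, pvLoopS_cons]
      norm_num
    | k' + 1, ih =>
      have h1 : List.replicate (k' + 1 + 1) v ++ nxt :: tail
          = v :: (List.replicate (k' + 1) v ++ nxt :: tail) := by
        rfl
      have h2 : List.replicate (k' + 1) v ++ nxt :: tail
          = v :: (List.replicate k' v ++ nxt :: tail) := by
        rfl
      rw [h1, h2, pvLoopS_cons, pvBoundary]
      rw [if_pos (show j * (v - v) < ops by simpa using hops)]
      rw [show ops - j * (v - v) = ops by ring]
      rw [← h2, ih (j + 1) ops (ans - v * v) (by omega) hops]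
      congr 1 <;> push_cast <;> ring

theorem pvLoopB_step (cnt : PySem.Dict Int Int) (v nxt : Int) (rest : List Int) (above ops ans : Int) :
    pvLoopB cnt (v :: nxt :: rest) above ops ans =
      (if (above + cnt.getD v 0) * (v - nxt) < ops then
        pvLoopB cnt (nxt :: rest) (above + cnt.getD v 0) (ops - (above + cnt.getD v 0) * (v - nxt)) (ans - cnt.getD v 0 * v * v)
      else
        (ans - cnt.getD v 0 * v * v) + PySem.Int.mod ops (above + cnt.getD v 0) * (v - PySem.Int.floordiv ops (above + cnt.getD v 0) - 1) * (v - PySem.Int.floordiv ops (above + cnt.getD v 0) - 1) + (above + cnt.getD v 0 - PySem.Int.mod ops (above + cnt.getD v 0)) * (v - PySem.Int.floordiv ops (above + cnt.getD v 0)) * (v - PySem.Int.floordiv ops (above + cnt.getD v 0))) := rfl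

def pvFlat (c : Int → Nat) (lv : List Int) : List Int := lv.flatMap (fun v => List.replicate (c v) v)

def pvCap (c : Int → Nat) (lv : List Int) (above : Int) : Int :=
  match lv with
  | [] => 0
  | v :: _ => above * v + (pvFlat c lv).sum

theorem pvFlat_cons (c : Int → Nat) (v : Int) (rest : List Int) :
    pvFlat c (v :: rest) = List.replicate (c v) v ++ pvFlat c rest := by
  simp [pvFlat]

theorem pvSum_replicate (n : Nat) (x : Int) : (List.replicate n x).sum = (n : Int) * x := by
  simp [List.sum_replicate]

theorem pvLoopS_eq_pvLoopB (c : Int → Nat) (cnt : PySem.Dict Int Int) :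
    ∀ (lv : List Int) (above ops ans : Int),
    (∀ v ∈ lv, 1 ≤ c v) →
    (∀ v ∈ lv, cnt.getD v 0 = (c v : Int)) →
    0 < ops → ops ≤ pvCap c lv above →
    pvLoopS (pvFlat c lv ++ [0]) (above + 1) ops ans = some (pvLoopB cnt (lv ++ [0]) above ops ans) := by
  intro lv
  induction lv with
  | nil =>
    intro above ops ans _ _ hops hcap
    simp [pvCap] at hcap
    omega
  | cons v rest ih =>
    intro above ops ans hc hcnt hops hcap
    have hm : 1 ≤ c v := hc v (by simp)
    have hcv : cnt.getD v 0 = (c v : Int) := hcnt v (by simp)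
    have hcap' : ops ≤ above * v + ((c v : Int) * v + (pvFlat c rest).sum) := by
      have := hcap
      rw [pvCap] at this
      rw [pvFlat_cons, List.sum_append, pvSum_replicate] at this
      linarith
    cases rest with
    | nil =>
      have hl : pvFlat c [v] ++ [0] = List.replicate (c v) v ++ (0 : Int) :: [] := by
        simp [pvFlat]
      rw [hl, pvLoopS_run v 0 [] (c v) (above + 1) ops ans hm hops]
      rw [show (above + 1) + (c v : Int) - 1 = above + (c v : Int) by ring]
      rw [show ([v] ++ [0] : List Int) = v :: 0 :: [] from rfl, pvLoopB_step, hcv]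
      simp only [pvBoundary]
      split_ifs with h
      · exfalso
        have hs : (pvFlat c ([] : List Int)).sum = 0 := by simp [pvFlat]
        rw [hs] at hcap'
        have : (above + (c v : Int)) * (v - 0) = above * v + (c v : Int) * v := by ring
        linarith
      · simp only [Option.some.injEq]
        ring
    | cons w rest' =>
      have hmw : 1 ≤ c w := hc w (by simp)
      have hrep : List.replicate (c w) w = w :: List.replicate (c w - 1) w := by
        conv_lhs => rw [show c w = (c w - 1) + 1 by omega]
        rw [List.replicate_succ]
      have hl : pvFlat c (w :: rest') ++ [0] = w :: (List.replicate (c w - 1) w ++ (pvFlat c rest' ++ [0])) := by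
        rw [pvFlat_cons, hrep]
        simp
      rw [pvFlat_cons, List.append_assoc, hl]
      rw [pvLoopS_run v w _ (c v) (above + 1) ops ans hm hops]
      rw [show (above + 1) + (c v : Int) - 1 = above + (c v : Int) by ring]
      rw [show ((v :: w :: rest') ++ [0] : List Int) = v :: w :: (rest' ++ [0]) from rfl, pvLoopB_step, hcv]
      simp only [pvBoundary]
      split_ifs with h
      · rw [← hl]
        rw [ih (above + (c v : Int)) (ops - (above + (c v : Int)) * (v - w)) (ans - (c v : Int) * v * v)
            (fun u hu => hc u (by simp [hu])) (fun u hu => hcnt u (by simp [hu]))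
            (by linarith)
            (by
              rw [pvCap]
              rw [pvFlat_cons, List.sum_append, pvSum_replicate]
              have hex : (above + (c v : Int)) * (v - w) = above * v + (c v : Int) * v - ((above + (c v : Int)) * w) := by ring
              rw [pvFlat_cons, List.sum_append, pvSum_replicate] at hcap'
              linarith)]
        rfl
      · simp only [Option.some.injEq]
        ring

theorem pvfd_mul (d v : Int) (hd : 0 < d) :
    PySem.Int.floordiv (d * v) d = v ∧ PySem.Int.mod (d * v) d = 0 := by
  have h1 : PySem.Int.floordiv (d * v) d = v := by
    rw [PySem.Int.floordiv_eq_iff_of_pos hd]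
    constructor <;> nlinarith
  refine ⟨h1, ?_⟩
  have h2 := PySem.Int.floordiv_mul_add_mod (d * v) d
  rw [h1] at h2
  linarith [h2]

theorem pvSqSum_cons (c : Int → Nat) (v : Int) (rest : List Int) :
    ((pvFlat c (v :: rest)).map (fun d => d * d)).sum
      = (c v : Int) * (v * v) + ((pvFlat c rest).map (fun d => d * d)).sum := by
  rw [pvFlat_cons, List.map_append, List.sum_append, List.map_replicate, pvSum_replicate]

theorem pvFlat_nonneg (c : Int → Nat) (lv : List Int) (h : ∀ v ∈ lv, 0 ≤ v) :
    0 ≤ (pvFlat c lv).sum := by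
  apply List.sum_nonneg
  intro x hx
  rw [pvFlat, List.mem_flatMap] at hx
  obtain ⟨a, ha, hxa⟩ := hx
  rw [List.eq_of_mem_replicate hxa]
  exact h a ha

theorem pvLoopS_exact (c : Int → Nat) :
    ∀ (lv : List Int) (above ops ans : Int),
    lv.Pairwise (· > ·) → (∀ v ∈ lv, 0 ≤ v) → (∀ v ∈ lv, 1 ≤ c v) →
    0 < ops → ops = pvCap c lv above → 0 ≤ above →
    ans = ((pvFlat c lv).map (fun d => d * d)).sum →
    pvLoopS (pvFlat c lv ++ [0]) (above + 1) ops ans = some 0 := by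
  intro lv
  induction lv with
  | nil =>
    intro above ops ans _ _ _ hops hcap _ _
    simp [pvCap] at hcap
    omega
  | cons v rest ih =>
    intro above ops ans hpw hnn hc hops hcap habove hans
    have hm : 1 ≤ c v := hc v (by simp)
    have hdpos : (0 : Int) < above + (c v : Int) := by
      have : (1 : Int) ≤ (c v : Int) := by exact_mod_cast hm
      linarith
    have hcap' : ops = above * v + ((c v : Int) * v + (pvFlat c rest).sum) := by
      rw [pvCap] at hcap
      rw [pvFlat_cons, List.sum_append, pvSum_replicate] at hcap
      linarith
    have hans' : ans - (c v : Int) * v * v = ((pvFlat c rest).map (fun d => d * d)).sum := by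
      rw [hans, pvSqSum_cons]; ring
    cases rest with
    | nil =>
      have hl : pvFlat c [v] ++ [0] = List.replicate (c v) v ++ (0 : Int) :: [] := by
        simp [pvFlat]
      rw [hl, pvLoopS_run v 0 [] (c v) (above + 1) ops ans hm hops]
      rw [show (above + 1) + (c v : Int) - 1 = above + (c v : Int) by ring]
      simp only [pvBoundary]
      have hsf : (pvFlat c ([] : List Int)).sum = 0 := by simp [pvFlat]
      rw [hsf] at hcap'
      have hopseq : ops = (above + (c v : Int)) * v := by linarith [hcap']
      rw [if_neg (by rw [hopseq]; intro hlt; nlinarith)]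
      obtain ⟨hfd, hmod⟩ := pvfd_mul (above + (c v : Int)) v hdpos
      rw [hopseq, hfd, hmod]
      have hzz : ans - (c v : Int) * v * v = 0 := by
        rw [hans']; simp [pvFlat]
      simp only [Option.some.injEq]
      rw [hzz]
      ring
    | cons w rest' =>
      have hS : 0 ≤ (pvFlat c (w :: rest')).sum :=
        pvFlat_nonneg c _ (fun u hu => hnn u (by simp [hu]))
      have hmw : 1 ≤ c w := hc w (by simp)
      have hrep : List.replicate (c w) w = w :: List.replicate (c w - 1) w := by
        conv_lhs => rw [show c w = (c w - 1) + 1 by omega]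
        rw [List.replicate_succ]
      have hl : pvFlat c (w :: rest') ++ [0] = w :: (List.replicate (c w - 1) w ++ (pvFlat c rest' ++ [0])) := by
        rw [pvFlat_cons, hrep]
        simp
      rw [pvFlat_cons, List.append_assoc, hl]
      rw [pvLoopS_run v w _ (c v) (above + 1) ops ans hm hops]
      rw [show (above + 1) + (c v : Int) - 1 = above + (c v : Int) by ring]
      simp only [pvBoundary]
      by_cases hC : 0 < (above + (c v : Int)) * w + (pvFlat c (w :: rest')).sum
      · have hkey : ops - (above + (c v : Int)) * (v - w)
            = (above + (c v : Int)) * w + (pvFlat c (w :: rest')).sum := by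
          linear_combination hcap'
        rw [if_pos (by linarith [hkey])]
        rw [← hl]
        exact ih (above + (c v : Int)) _ _
          (List.pairwise_cons.mp hpw).2
          (fun u hu => hnn u (by simp [hu]))
          (fun u hu => hc u (by simp [hu]))
          (by linarith [hkey])
          (by rw [pvCap]; exact hkey)
          (by linarith)
          (by rw [hans'])
      · -- capacity after this level is 0: w = 0, the remaining flat sums to 0, budget used exactly
        have hw0 : 0 ≤ w := hnn w (by simp)
        have hwz : w = 0 ∧ (pvFlat c (w :: rest')).sum = 0 := by
          constructor <;> nlinarith
        obtain ⟨hw, hS0⟩ := hwz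
        subst hw
        have hopseq : ops = (above + (c v : Int)) * (v - 0) := by
          linear_combination hcap' + hS0
        rw [if_neg (by rw [hopseq]; exact lt_irrefl _)]
        obtain ⟨hfd, hmod⟩ := pvfd_mul (above + (c v : Int)) (v - 0) hdpos
        rw [hopseq, hfd, hmod]
        have hpw' : ∀ a ∈ rest', (0 : Int) > a :=
          (List.pairwise_cons.mp (List.pairwise_cons.mp hpw).2).1
        have hall : ∀ x ∈ pvFlat c ((0 : Int) :: rest'), x = 0 := by
          intro x hx
          rw [pvFlat, List.mem_flatMap] at hx
          obtain ⟨a, ha, hxa⟩ := hx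
          have hax := List.eq_of_mem_replicate hxa
          subst hax
          rcases List.mem_cons.mp ha with ha2 | ha2
          · exact ha2
          · have h1 := hpw' x ha2
            have h2 := hnn x (by simp [ha2])
            omega
        have hzz : ans - (c v : Int) * v * v = 0 := by
          rw [hans']
          apply List.sum_eq_zero
          intro y hy
          rw [List.mem_map] at hy
          obtain ⟨x, hx, rfl⟩ := hy
          rw [hall x hx]
          ring
        simp only [Option.some.injEq]
        rw [hzz]
        ring

theorem pvFoldlAdd (f : Int → Int) : ∀ (l : List Int) (s : Int),
    l.foldl (fun a d => a + f d) s = s + (l.map f).sum := by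
  intro l
  induction l with
  | nil => simp
  | cons x l ih => intro s; simp [ih]; ring

theorem pvFoldlAddP (g : Int × Int → Int) : ∀ (l : List (Int × Int)) (s : Int),
    l.foldl (fun a p => a + g p) s = s + (l.map g).sum := by
  intro l
  induction l with
  | nil => simp
  | cons x l ih => intro s; simp [ih]; ring

theorem pvSumErase (g : Int → Int) (S : List Int) (x : Int) (hx : x ∈ S) :
    (S.map g).sum = g x + ((S.erase x).map g).sum := by
  have hp := (List.perm_cons_erase hx).map g
  rw [hp.sum_eq]
  simp

theorem pvDiscardPerm (S : List Int) (x : Int) (hnd : S.Nodup) :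
    (PySem.Set.discard S x).Perm (S.erase x) := by
  rw [List.perm_ext_iff_of_nodup (PySem.Set.nodup_discard _ _ hnd) (hnd.erase x)]
  intro a
  rw [PySem.Set.mem_discard, List.Nodup.mem_erase_iff hnd]
  tauto

theorem pvSumFCount (f : Int → Int) : ∀ xs : List Int,
    ((PySem.Set.ofList xs).map (fun k => f k * ((xs.count k : Nat) : Int))).sum = (xs.map f).sum := by
  intro xs
  induction xs with
  | nil => simp [PySem.Set.ofList]
  | cons x xs ih =>
    rw [PySem.Set.ofList_cons]
    simp only [List.map_cons, List.sum_cons, List.count_cons_self]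
    by_cases hx : x ∈ PySem.Set.ofList xs
    · have hnd := PySem.Set.nodup_ofList (xs := xs)
      have hdp := (pvDiscardPerm (PySem.Set.ofList xs) x hnd).map (fun k => f k * (((x :: xs).count k : Nat) : Int))
      rw [hdp.sum_eq]
      have hcong : ∀ k ∈ (PySem.Set.ofList xs).erase x, f k * (((x :: xs).count k : Nat) : Int) = f k * ((xs.count k : Nat) : Int) := by
        intro k hk
        have hne : k ≠ x := (List.Nodup.mem_erase_iff hnd |>.mp hk).1
        simp [Ne.symm hne]
      rw [List.map_congr_left hcong]
      have hsplit := pvSumErase (fun k => f k * ((xs.count k : Nat) : Int)) (PySem.Set.ofList xs) x hx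
      rw [← ih, hsplit]
      push_cast
      ring
    · have hnd := PySem.Set.nodup_ofList (xs := xs)
      have hxxs : x ∉ xs := fun h => hx ((PySem.Set.mem_ofList _ _).mpr h)
      have hdp := (pvDiscardPerm (PySem.Set.ofList xs) x hnd).map (fun k => f k * (((x :: xs).count k : Nat) : Int))
      rw [hdp.sum_eq, List.erase_of_not_mem hx]
      have hcong : ∀ k ∈ PySem.Set.ofList xs, f k * (((x :: xs).count k : Nat) : Int) = f k * ((xs.count k : Nat) : Int) := by
        intro k hk
        have hne : k ≠ x := fun h => hxxs (h ▸ (PySem.Set.mem_ofList _ _).mp hk)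
        simp [Ne.symm hne]
      rw [List.map_congr_left hcong, ih]
      have hz : xs.count x = 0 := List.count_eq_zero.mpr hxxs
      rw [hz]
      push_cast
      ring

theorem pvLv_nodup (xs : List Int) :
    (PySem.List.sorted (PySem.Set.ofList xs) (fun x => x) true).Nodup :=
  (PySem.List.sorted_perm (PySem.Set.ofList xs) (fun x => x) true).nodup_iff.mpr
    (PySem.Set.nodup_ofList _)

theorem pvLv_pairwise_gt (xs : List Int) :
    (PySem.List.sorted (PySem.Set.ofList xs) (fun x => x) true).Pairwise (· > ·) := by
  have h1 := PySem.List.sorted_pairwise_rev (PySem.Set.ofList xs) (fun x => x)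
  have h2 := pvLv_nodup xs
  exact (h1.and h2).imp (fun h => lt_of_le_of_ne h.1 (Ne.symm h.2))

theorem pvLv_mem (xs : List Int) (v : Int) :
    v ∈ PySem.List.sorted (PySem.Set.ofList xs) (fun x => x) true ↔ v ∈ xs := by
  rw [(PySem.List.sorted_perm (PySem.Set.ofList xs) (fun x => x) true).mem_iff]
  exact PySem.Set.mem_ofList _ _

theorem pvCountFlat (c : Int → Nat) (x : Int) : ∀ lv : List Int, lv.Nodup →
    (pvFlat c lv).count x = if x ∈ lv then c x else 0 := by
  intro lv
  induction lv with
  | nil => intro _; simp [pvFlat]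
  | cons v rest ih =>
    intro hnd
    rw [pvFlat_cons, List.count_append, ih hnd.of_cons]
    by_cases hx : x = v
    · subst hx
      have hnr : x ∉ rest := (List.nodup_cons.mp hnd).1
      simp [hnr]
    · simp [List.count_replicate, hx, List.mem_cons]
      exact fun h => absurd h.symm hx

theorem pvFlat_perm (xs lv : List Int) (hnd : lv.Nodup) (hmem : ∀ x, x ∈ lv ↔ x ∈ xs) :
    (pvFlat (fun v => xs.count v) lv).Perm xs := by
  rw [List.perm_iff_count]
  intro x
  rw [pvCountFlat _ x lv hnd]
  by_cases hx : x ∈ lv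
  · simp [hx]
  · have : x ∉ xs := fun h => hx ((hmem x).mpr h)
    simp [hx, List.count_eq_zero.mpr this]

theorem pvRep_pairwise (v : Int) (n : Nat) : (List.replicate n v).Pairwise (fun a b : Int => b ≤ a) := by
  induction n with
  | zero => simp
  | succ k ih =>
    rw [List.replicate_succ, List.pairwise_cons]
    exact ⟨fun b hb => le_of_eq (List.eq_of_mem_replicate hb), ih⟩

theorem pvFlat_pairwise (c : Int → Nat) : ∀ lv : List Int, lv.Pairwise (· > ·) →
    (pvFlat c lv).Pairwise (fun a b : Int => b ≤ a) := by
  intro lv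
  induction lv with
  | nil => intro _; simp [pvFlat]
  | cons v rest ih =>
    intro hpw
    rw [pvFlat_cons, List.pairwise_append]
    refine ⟨pvRep_pairwise v (c v), ih (List.pairwise_cons.mp hpw).2, ?_⟩
    intro a ha b hb
    rw [List.eq_of_mem_replicate ha]
    rw [pvFlat, List.mem_flatMap] at hb
    obtain ⟨u, hu, hbu⟩ := hb
    rw [List.eq_of_mem_replicate hbu]
    exact le_of_lt ((List.pairwise_cons.mp hpw).1 u hu)

theorem pvSd_eq_flat (xs : List Int) :
    PySem.List.sorted xs (fun x => x) true
      = pvFlat (fun v => xs.count v) (PySem.List.sorted (PySem.Set.ofList xs) (fun x => x) true) := by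
  have hperm : (PySem.List.sorted xs (fun x => x) true).Perm
      (pvFlat (fun v => xs.count v) (PySem.List.sorted (PySem.Set.ofList xs) (fun x => x) true)) :=
    (PySem.List.sorted_perm xs (fun x => x) true).trans
      (pvFlat_perm xs _ (pvLv_nodup xs) (pvLv_mem xs)).symm
  exact List.Perm.eq_of_pairwise
    (fun a b _ _ h1 h2 => le_antisymm h2 h1)
    (PySem.List.sorted_pairwise_rev xs (fun x => x))
    (pvFlat_pairwise _ _ (pvLv_pairwise_gt xs))
    hperm

theorem pvfd_zero (d : Int) (hd : 0 < d) : PySem.Int.floordiv 0 d = 0 ∧ PySem.Int.mod 0 d = 0 := by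
  have h := pvfd_mul d 0 hd
  rwa [mul_zero] at h

theorem pvLoopS_ops0 (sd : List Int) (ans : Int) (hnn : ∀ x ∈ sd, 0 ≤ x)
    (hpw : sd.Pairwise (fun a b : Int => b ≤ a)) (hne : sd ≠ []) :
    pvLoopS (sd ++ [0]) 1 0 ans = some ans := by
  match sd, hne with
  | v :: rest, _ =>
    have hv0 : 0 ≤ v := hnn v (by simp)
    obtain ⟨nxt, tail, hdec, hle⟩ : ∃ nxt tail, rest ++ [0] = nxt :: tail ∧ nxt ≤ v := by
      cases rest with
      | nil => exact ⟨0, [], rfl, hv0⟩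
      | cons w r => exact ⟨w, r ++ [0], rfl, (List.pairwise_cons.mp hpw).1 w (by simp)⟩
    rw [show (v :: rest) ++ [0] = v :: (rest ++ [0]) from rfl, hdec, pvLoopS_cons]
    simp only [pvBoundary]
    rw [if_neg (by nlinarith)]
    obtain ⟨hfd, hmod⟩ := pvfd_zero 1 one_pos
    rw [hfd, hmod]
    simp only [Option.some.injEq]
    ring

theorem pvLoopB_ops0 (cnt : PySem.Dict Int Int) (v0 : Int) (lrest : List Int) (ans : Int)
    (hpw : (v0 :: lrest).Pairwise (· > ·)) (hnn : ∀ x ∈ v0 :: lrest, 0 ≤ x)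
    (hm : 1 ≤ cnt.getD v0 0) :
    pvLoopB cnt ((v0 :: lrest) ++ [0]) 0 0 ans = ans := by
  have hv0 : 0 ≤ v0 := hnn v0 (by simp)
  obtain ⟨nxt, rest2, hdec, hle⟩ : ∃ nxt rest2, lrest ++ [0] = nxt :: rest2 ∧ nxt ≤ v0 := by
    cases lrest with
    | nil => exact ⟨0, [], rfl, hv0⟩
    | cons w r => exact ⟨w, r ++ [0], rfl, le_of_lt ((List.pairwise_cons.mp hpw).1 w (by simp))⟩
  rw [show (v0 :: lrest) ++ [0] = v0 :: (lrest ++ [0]) from rfl, hdec, pvLoopB_step]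
  rw [if_neg (by nlinarith)]
  obtain ⟨hfd, hmod⟩ := pvfd_zero (0 + cnt.getD v0 0) (by linarith)
  rw [hfd, hmod]
  ring

theorem pvAllZeroSq (l : List Int) (hnn : ∀ x ∈ l, 0 ≤ x) (hs : l.sum = 0) :
    (l.map (fun d => d * d)).sum = 0 := by
  apply List.sum_eq_zero
  intro y hy
  rw [List.mem_map] at hy
  obtain ⟨x, hx, rfl⟩ := hy
  suffices hx0 : x = 0 by rw [hx0]; ring
  induction l with
  | nil => simp at hx
  | cons a t ih =>
    have ha : 0 ≤ a := hnn a (by simp)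
    have ht : 0 ≤ t.sum := List.sum_nonneg (fun z hz => hnn z (by simp [hz]))
    rw [List.sum_cons] at hs
    rcases List.mem_cons.mp hx with rfl | hx2
    · omega
    · exact ih (fun z hz => hnn z (by simp [hz])) (by omega) hx2

theorem pvLoopA_all (l : List Int) (ops ans : Int) :
    pvLoopA l l 0 ops ans = pvLoopS l 1 ops ans := by
  have h := pvLoopA_eq_pvLoopS l [] ops ans
  simpa using h

theorem pvFoldCounter (l : List (Int × Int)) :
    l.foldl (fun d p => d.insert |p.1 - p.2| (d.getD |p.1 - p.2| 0 + 1)) PySem.Dict.empty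
      = PySem.Dict.counter (l.map (fun p => |p.1 - p.2|)) := by
  rw [← PySem.Dict.foldl_insert_getD_add_one_eq_counter, List.foldl_map]

theorem pvItemsSum (xs : List Int) (f : Int → Int) :
    (((PySem.Dict.counter xs).items).map (fun p => f p.1 * p.2)).sum = (xs.map f).sum := by
  rw [PySem.Dict.items_counter, List.map_map]
  have : ((fun p : Int × Int => f p.1 * p.2) ∘ fun k => ((k, (xs.count k : Int)) : Int × Int))
      = fun k => f k * ((xs.count k : Nat) : Int) := rfl
  rw [this, pvSumFCount]

theorem pv_assembly (nums1 nums2 : List Int) (k1 k2 : Int)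
    (hk : 0 ≤ k1 + k2) (hemp : (nums1 = [] ∨ nums2 = []) → 0 < k1 + k2) :
    minSumSquareDiff nums1 nums2 k1 k2 = minSumSquareDiff_alt nums1 nums2 k1 k2 := by
  unfold minSumSquareDiff minSumSquareDiff_alt
  simp only []
  set diffs := (nums1.zip nums2).map (fun p => |p.1 - p.2|) with hdiffs
  set ops := k1 + k2 with hops
  set sd := PySem.List.sorted diffs (fun x => x) true with hsd
  set lv := PySem.List.sorted (PySem.Set.ofList diffs) (fun x => x) true with hlv
  have hcntf := pvFoldCounter (nums1.zip nums2)
  rw [hcntf]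
  set cnt := PySem.Dict.counter diffs with hcnt
  have hAsum : diffs.foldl (fun s d => s + d) 0 = diffs.sum := by
    simpa using pvFoldlAdd (fun d => d) diffs 0
  have hAans : diffs.foldl (fun s d => s + d * d) 0 = (diffs.map (fun d => d * d)).sum := by
    simpa using pvFoldlAdd (fun d => d * d) diffs 0
  have hBtot : cnt.items.foldl (fun s p => s + p.1 * p.2) 0 = diffs.sum := by
    rw [pvFoldlAddP (fun p => p.1 * p.2) cnt.items 0, zero_add]
    have := pvItemsSum diffs (fun k => k)
    simpa using this
  have hBans : cnt.items.foldl (fun s p => s + p.1 * p.1 * p.2) 0 = (diffs.map (fun d => d * d)).sum := by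
    rw [pvFoldlAddP (fun p => p.1 * p.1 * p.2) cnt.items 0, zero_add]
    have := pvItemsSum diffs (fun k => k * k)
    simpa using this
  have hkeys : cnt.keys = PySem.Set.ofList diffs := PySem.Dict.keys_counter diffs
  rw [hAsum, hAans, hBtot, hBans, hkeys, ← hlv]
  have hnn : ∀ x ∈ diffs, (0 : Int) ≤ x := by
    intro x hx
    rw [hdiffs, List.mem_map] at hx
    obtain ⟨p, _, rfl⟩ := hx
    exact abs_nonneg _
  have hflat : sd = pvFlat (fun v => diffs.count v) lv := pvSd_eq_flat diffs
  have hflatsum : (pvFlat (fun v => diffs.count v) lv).sum = diffs.sum := by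
    rw [← hflat]
    exact (PySem.List.sorted_perm diffs (fun x => x) true).sum_eq
  have hgetD : ∀ v ∈ lv, cnt.getD v 0 = ((diffs.count v : Nat) : Int) :=
    fun v _ => PySem.Dict.getD_counter diffs v
  have hcpos : ∀ v ∈ lv, 1 ≤ diffs.count v := by
    intro v hv
    exact List.count_pos_iff.mpr ((pvLv_mem diffs v).mp hv)
  have hlvnn : ∀ v ∈ lv, (0 : Int) ≤ v := fun v hv => hnn v ((pvLv_mem diffs v).mp hv)
  have hdne0 : diffs = [] → (0 : Int) < ops := by
    intro h
    rw [hdiffs, List.map_eq_nil_iff, List.zip_eq_nil_iff] at h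
    exact hemp h
  have hlvne0 : diffs ≠ [] → lv ≠ [] := by
    intro hd h
    rw [hlv, PySem.List.sorted_eq_nil_iff] at h
    match hde : diffs, hd with
    | d :: ds, _ =>
      have : d ∈ PySem.Set.ofList (d :: ds) := (PySem.Set.mem_ofList _ _).mpr (by simp)
      rw [hde] at h
      rw [h] at this
      simp at this
  have hsdne : diffs ≠ [] → sd ≠ [] := by
    intro hd h
    rw [hsd, PySem.List.sorted_eq_nil_iff] at h
    exact hd h
  have hsdnn : ∀ x ∈ sd, (0 : Int) ≤ x := by
    intro x hx
    exact hnn x ((PySem.List.sorted_perm diffs (fun x => x) true).mem_iff.mp hx)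
  have hsdpw : sd.Pairwise (fun a b : Int => b ≤ a) :=
    PySem.List.sorted_pairwise_rev diffs (fun x => x)
  rcases lt_trichotomy diffs.sum ops with hlt | heq | hgt
  · rw [if_pos hlt, if_pos (le_of_lt hlt)]
  · -- sum = ops
    rw [if_neg (by omega), if_pos (le_of_eq heq)]
    by_cases hops0 : ops = 0
    · -- ops = 0 and sum = 0: every diff is 0, the loop returns the square sum 0
      have hdne : diffs ≠ [] := fun h => by have := hdne0 h; omega
      have hz : (diffs.map (fun d => d * d)).sum = 0 := pvAllZeroSq diffs hnn (by omega)
      rw [pvLoopA_all, hops0, pvLoopS_ops0 sd _ hsdnn hsdpw (hsdne hdne), hz]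
    · -- 0 < ops = sum: the budget is used exactly, the loop returns 0
      have hopspos : 0 < ops := lt_of_le_of_ne hk (Ne.symm hops0)
      have hdne : diffs ≠ [] := by
        intro h
        rw [h] at heq
        simp at heq
        omega
      match hlveq : lv, hlvne0 hdne with
      | v0 :: lrest, _ =>
        have hcap : ops = pvCap (fun v => diffs.count v) (v0 :: lrest) 0 := by
          rw [pvCap, hflatsum]
          omega
        have h := pvLoopS_exact (fun v => diffs.count v) (v0 :: lrest) 0 ops
          ((diffs.map (fun d => d * d)).sum)
          (show (v0 :: lrest).Pairwise (· > ·) by rw [hlv]; exact pvLv_pairwise_gt diffs)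
          (fun u hu => hlvnn u hu)
          (fun u hu => hcpos u hu)
          hopspos hcap le_rfl
          (by rw [← hflat]
              exact ((PySem.List.sorted_perm diffs (fun x => x) true).map _).sum_eq.symm)
        rw [zero_add] at h
        rw [pvLoopA_all, hflat, h]
  · -- sum > ops
    rw [if_neg (by omega), if_neg (by omega)]
    have hdne : diffs ≠ [] := by
      intro h
      rw [h] at hgt
      simp at hgt
      omega
    by_cases hops0 : ops = 0
    · -- zero budget: both loops return the full square sum at the first step
      match hlveq : lv, hlvne0 hdne with
      | v0 :: lrest, _ =>
        rw [pvLoopA_all, hops0]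
        rw [pvLoopS_ops0 sd _ hsdnn hsdpw (hsdne hdne)]
        rw [pvLoopB_ops0 cnt v0 lrest _
          (show (v0 :: lrest).Pairwise (· > ·) by rw [hlv]; exact pvLv_pairwise_gt diffs)
          (fun u hu => hlvnn u hu)
          (by rw [hgetD v0 (by simp)]
              exact_mod_cast hcpos v0 (by simp))]
    · -- 0 < ops < sum: level walk equals element walk
      have hopspos : 0 < ops := lt_of_le_of_ne hk (Ne.symm hops0)
      match hlveq : lv, hlvne0 hdne with
      | v0 :: lrest, _ =>
        have hcap : ops ≤ pvCap (fun v => diffs.count v) (v0 :: lrest) 0 := by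
          rw [pvCap, hflatsum]
          omega
        have h := pvLoopS_eq_pvLoopB (fun v => diffs.count v) cnt (v0 :: lrest) 0 ops
          ((diffs.map (fun d => d * d)).sum)
          (fun u hu => hcpos u hu)
          (fun u hu => hgetD u hu)
          hopspos hcap
        rw [zero_add] at h
        rw [pvLoopA_all, hflat, h]

-- ===== VERDICT (by name: the statement is the Claim_ definition above) =====
theorem minSumSquareDiff_spec : Claim_equal_minSumSquareDiff := by
  intro nums1 nums2 k1 k2 _ hpre
  unfold Pre_minSumSquareDiff at hpre
  unfold Spec_minSumSquareDiff
  exact pv_assembly nums1 nums2 k1 k2 hpre.1 hpre.2
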